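-- pv_equiv track=rewrite | github.com/sperezg6/evolutionaty_calendar_algorithm | main.py | assign_matches_to_days
-- ===== SOURCE A (Python) =====
-- def assign_matches_to_days(round_matches):
--      # Asigna partidos a días específicos en una jornada
--     days = ["Viernes", "Sábado", "Domingo", "Lunes"]
--     matches_per_day = {
--         "Viernes": 1,
--         "Sábado": (len(round_matches) - 2) // 2,
--         "Domingo": (len(round_matches) - 2) // 2,
--         "Lunes": 1
--     }
--
--     assigned_matches = {}
--     match_index = 0
--     for day in days:
--         assigned_matches[day] = []
--         for _ in range(matches_per_day[day]):
--             if match_index < len(round_matches):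
--                 assigned_matches[day].append(round_matches[match_index])
--                 match_index += 1
--     return assigned_matches
-- ===== SOURCE B (Python) =====
-- def assign_matches_to_days(round_matches):
--     # Simpler: cumulative slicing instead of a nested per-element append loop.
--     n = len(round_matches)
--     matches_per_day = {
--         "Viernes": 1,
--         "Sábado": (n - 2) // 2,
--         "Domingo": (n - 2) // 2,
--         "Lunes": 1,
--     }
--     assigned_matches = {}
--     idx = 0
--     for day in ["Viernes", "Sábado", "Domingo", "Lunes"]:
--         seg = round_matches[idx: idx + max(0, matches_per_day[day])]
--         assigned_matches[day] = seg
--         idx += len(seg)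
--     return assigned_matches
-- ===== Notes on version B (the rewrite author's own statement) =====
-- stated objective: simpler
-- what changed: Replaces A's nested per-day range(count) loop that appends elements one at a time under an index-bound guard with a single pass that takes one clamped cumulative slice per day and advances the offset by the slice's length.
import Mathlib
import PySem

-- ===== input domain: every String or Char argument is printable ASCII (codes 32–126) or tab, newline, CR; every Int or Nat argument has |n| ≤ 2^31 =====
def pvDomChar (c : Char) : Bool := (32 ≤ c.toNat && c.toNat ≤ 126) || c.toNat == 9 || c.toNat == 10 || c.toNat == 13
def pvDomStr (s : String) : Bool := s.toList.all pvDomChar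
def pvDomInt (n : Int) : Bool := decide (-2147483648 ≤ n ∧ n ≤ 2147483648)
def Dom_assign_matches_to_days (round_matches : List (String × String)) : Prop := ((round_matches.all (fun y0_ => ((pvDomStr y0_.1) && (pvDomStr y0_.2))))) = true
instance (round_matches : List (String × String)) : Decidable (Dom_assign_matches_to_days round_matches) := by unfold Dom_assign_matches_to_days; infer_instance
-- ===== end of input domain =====

-- B replaces A's nested per-element append loop over range(count) by one cumulative-slice pass (simpler decomposition, same cost).

-- ===== PORT A =====
-- literal transliteration of A: dict of per-day counts, then for each day an inner
-- range(count) loop appending round_matches[match_index] while the index is in bounds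
-- (Python mutates the list stored in the dict; ported as Dict.modify with an append)
def assign_matches_to_days (round_matches : List (String × String)) : List (String × List (String × String)) :=
  let days : List String := ["Viernes", "Sábado", "Domingo", "Lunes"]
  let matches_per_day : PySem.Dict String Int :=
    ((((PySem.Dict.empty).insert "Viernes" 1).insert "Sábado"
        (PySem.Int.floordiv ((round_matches.length : Int) - 2) 2)).insert "Domingo"
        (PySem.Int.floordiv ((round_matches.length : Int) - 2) 2)).insert "Lunes" 1
  let st :=
    days.foldl
      (fun (st : PySem.Dict String (List (String × String)) × Nat) day =>
        let st := (st.1.insert day [], st.2)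
        (PySem.List.pyRange 0 (matches_per_day.getD day 0)).foldl
          (fun st _ =>
            if st.2 < round_matches.length then
              (st.1.modify day [] (fun l => l ++ [(PySem.List.pyGet? round_matches (st.2 : Int)).getD ("", "")]),
               st.2 + 1)
            else st) st)
      (PySem.Dict.empty, 0)
  st.1.items

-- ===== PORT B =====
-- transliteration of B (Source B): one pass over the four days, cumulative index, one clamped slice per day
def assign_matches_to_days_alt (round_matches : List (String × String)) : List (String × List (String × String)) :=
  let n : Int := (round_matches.length : Int)
  let matches_per_day : PySem.Dict String Int :=
    ((((PySem.Dict.empty).insert "Viernes" 1).insert "Sábado"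
        (PySem.Int.floordiv (n - 2) 2)).insert "Domingo"
        (PySem.Int.floordiv (n - 2) 2)).insert "Lunes" 1
  let st :=
    (["Viernes", "Sábado", "Domingo", "Lunes"] : List String).foldl
      (fun (st : PySem.Dict String (List (String × String)) × Nat) day =>
        let seg := PySem.List.slice round_matches (some (st.2 : Int))
                     (some ((st.2 : Int) + max 0 (matches_per_day.getD day 0)))
        (st.1.insert day seg, st.2 + seg.length))
      (PySem.Dict.empty, 0)
  st.1.items

-- ===== PRECONDITION & SPEC =====
def Spec_assign_matches_to_days (round_matches : List (String × String)) (out : List (String × List (String × String))) : Prop := out = assign_matches_to_days_alt round_matches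
instance (round_matches : List (String × String)) (out : List (String × List (String × String))) : Decidable (Spec_assign_matches_to_days round_matches out) := by unfold Spec_assign_matches_to_days; infer_instance

-- ===== CLAIM (what is proved, stated in full; the proofs are below) =====
def Claim_equal_assign_matches_to_days : Prop := ∀ (round_matches : List (String × String)), Dom_assign_matches_to_days round_matches → Spec_assign_matches_to_days round_matches (assign_matches_to_days round_matches)

-- ===== LEMMAS AND PROOFS =====

-- a fold whose body ignores the list elements just iterates its step l.length times
theorem foldl_ignore_elt {σ : Type} (g : σ → σ) : ∀ (l : List Int) (s : σ),
    l.foldl (fun s _ => g s) s = g^[l.length] s := by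
  intro l
  induction l with
  | nil => intro s; rfl
  | cons a tl ih => intro s; simpa [List.foldl] using ih (g s)

-- one append step of A's inner loop at dict level: modify after insert is insert of the appended list
theorem modify_insert_append (d : PySem.Dict String (List (String × String))) (day : String)
    (v : List (String × String)) (x : String × String) :
    (d.insert day v).modify day [] (fun l => l ++ [x]) = d.insert day (v ++ [x]) := by
  simp [PySem.Dict.modify, PySem.Dict.getD_insert_self, PySem.Dict.insert_insert_self]

-- A's inner step, iterated k times from (d.insert day acc, idx), inserts acc ++ the next
-- min(k, length - idx) elements and advances the index by that many
theorem innerA_iterate (xs : List (String × String)) (day : String) :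
    ∀ (k : Nat) (d : PySem.Dict String (List (String × String))) (acc : List (String × String)) (idx : Nat),
    (fun (st : PySem.Dict String (List (String × String)) × Nat) =>
        if st.2 < xs.length then
          (st.1.modify day [] (fun l => l ++ [(PySem.List.pyGet? xs (st.2 : Int)).getD ("", "")]), st.2 + 1)
        else st)^[k] (d.insert day acc, idx)
      = (d.insert day (acc ++ ((xs.drop idx).take k)), idx + ((xs.drop idx).take k).length) := by
  intro k
  induction k with
  | zero => intro d acc idx; simp
  | succ k ih =>
      intro d acc idx
      rw [Function.iterate_succ_apply]
      by_cases h : idx < xs.length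
      · have hget : PySem.List.pyGet? xs (idx : Int) = some xs[idx] := by
          simp [h]
        have hdrop : xs.drop idx = xs[idx] :: xs.drop (idx + 1) := List.drop_eq_getElem_cons h
        simp only [if_pos h, hget, Option.getD_some, modify_insert_append]
        rw [ih, hdrop]
        simp only [List.take_succ_cons, List.length_cons, List.append_assoc, List.cons_append,
          List.nil_append, Prod.mk.injEq]
        exact ⟨by trivial, by omega⟩
      · have hdrop : xs.drop idx = [] := List.drop_eq_nil_of_le (by omega)
        simp only [if_neg h]
        rw [ih, hdrop]
        simp

-- A's inner fold over range(c), started with an inserted accumulator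
theorem innerA_fold (xs : List (String × String)) (day : String) (c : Int)
    (d : PySem.Dict String (List (String × String))) (acc : List (String × String)) (idx : Nat) :
    (PySem.List.pyRange 0 c).foldl
        (fun (st : PySem.Dict String (List (String × String)) × Nat) _ =>
          if st.2 < xs.length then
            (st.1.modify day [] (fun l => l ++ [(PySem.List.pyGet? xs (st.2 : Int)).getD ("", "")]), st.2 + 1)
          else st) (d.insert day acc, idx)
      = (d.insert day (acc ++ ((xs.drop idx).take c.toNat)), idx + ((xs.drop idx).take c.toNat).length) := by
  rw [foldl_ignore_elt
        (fun (st : PySem.Dict String (List (String × String)) × Nat) =>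
          if st.2 < xs.length then
            (st.1.modify day [] (fun l => l ++ [(PySem.List.pyGet? xs (st.2 : Int)).getD ("", "")]), st.2 + 1)
          else st)]
  rw [PySem.List.length_pyRange_one]
  have : (c - 0).toNat = c.toNat := by omega
  rw [this, innerA_iterate]

-- B's clamped slice equals A's drop/take segment
theorem slice_seg (xs : List (String × String)) (idx : Nat) (c : Int) :
    PySem.List.slice xs (some (idx : Int)) (some ((idx : Int) + max 0 c))
      = (xs.drop idx).take c.toNat := by
  have h : max 0 c = ((c.toNat : Nat) : Int) := by omega
  rw [h, PySem.List.slice_natCast_add]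

-- ===== VERDICT (by name: the statement is the Claim_ definition above) =====
theorem assign_matches_to_days_spec : Claim_equal_assign_matches_to_days := by
  intro xs _
  unfold Spec_assign_matches_to_days assign_matches_to_days assign_matches_to_days_alt
  simp only [List.foldl]
  rw [innerA_fold, innerA_fold, innerA_fold, innerA_fold,
      slice_seg, slice_seg, slice_seg, slice_seg]
  simp only [List.nil_append]
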